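-- pv_equiv track=rewrite | github.com/nRachid/Lora-Project | Lora_Project.py | dewhitening
-- ===== SOURCE A (Python) =====
-- def dewhitening(message,S):
--     message = [int(x) for x in message]
--     S = [int(x) for x in S]
--     r= round(len(message)//len(S))
--
--     W = []
--     while len(message)>len(S):
--         m = message[:len(S)]
--         W = W + list(a^b for a,b in zip(m,S))
--         message = message[len(S):]
--
--     if len(message)<=len(S):
--         W = W + list(a^b for a,b in zip(message,S))
--
--     W = ''.join(str(x) for x in W)
--     return W
-- ===== SOURCE B (Python) =====
-- def dewhitening(message, S):
--     n = len(S)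
--     return ''.join(str(int(x) ^ int(S[i % n])) for i, x in enumerate(message))
-- ===== Notes on version B (the rewrite author's own statement) =====
-- stated objective: simpler
-- what changed: Replaces the block-by-block while loop that repeatedly slices the message and rebuilds the accumulator list with a single pass XORing message[i] against S[i % len(S)] inside one join.
import Mathlib
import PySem

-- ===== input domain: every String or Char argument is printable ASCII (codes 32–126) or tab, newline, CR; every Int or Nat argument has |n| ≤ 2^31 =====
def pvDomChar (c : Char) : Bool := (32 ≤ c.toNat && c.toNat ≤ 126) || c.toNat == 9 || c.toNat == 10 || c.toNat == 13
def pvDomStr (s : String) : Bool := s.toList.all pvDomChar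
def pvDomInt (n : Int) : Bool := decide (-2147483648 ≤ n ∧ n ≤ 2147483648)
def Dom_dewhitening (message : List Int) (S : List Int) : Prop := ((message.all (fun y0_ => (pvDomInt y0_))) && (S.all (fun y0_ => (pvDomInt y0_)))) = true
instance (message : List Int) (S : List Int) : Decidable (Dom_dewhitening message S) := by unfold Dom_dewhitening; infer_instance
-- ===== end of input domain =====

-- B is a single pass XORing message[i] with S[i % len(S)]; A re-slices the message block by block.
-- A mutates only its local rebindings, no caller-visible side effects.

-- ===== PORT A =====
-- while len(message) > len(S): xor one block, drop it.  The Prop argument hS only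
-- justifies termination (Python would raise ZeroDivisionError before this loop if S = []).
def dwLoopA (S : List Int) (hS : S ≠ []) (message W : List Int) : List Int × List Int :=
  if S.length < message.length then
    dwLoopA S hS (message.drop S.length)
      (W ++ List.zipWith PySem.Int.bxor (message.take S.length) S)
  else (message, W)
termination_by message.length
decreasing_by
  have : 0 < S.length := List.length_pos_iff.mpr hS
  simp only [List.length_drop]; omega

def dewhitening (message : List Int) (S : List Int) : String :=
  -- r = round(len(message)//len(S)) raises ZeroDivisionError when S = [] (r is unused);
  -- Pre_ excludes S = [], the guard only makes the port total.
  if hS : S = [] then ""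
  else
    let p := dwLoopA S hS message []
    -- after the loop len(message) <= len(S) always holds, so the trailing `if` fires
    let W := p.2 ++ List.zipWith PySem.Int.bxor p.1 S
    PySem.Str.join "" (W.map PySem.Int.toStr)

-- ===== PORT B =====
def dewhitening_alt (message : List Int) (S : List Int) : String :=
  PySem.Str.join ""
    ((PySem.List.enumerate message).map (fun p =>
      PySem.Int.toStr (PySem.Int.bxor p.2
        (PySem.List.pyGetD S (PySem.Int.mod p.1 (S.length : Int)) 0))))

-- ===== PRECONDITION & SPEC =====
-- Pre_ excludes S = [], on which the Python A raises ZeroDivisionError.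
def Pre_dewhitening (message : List Int) (S : List Int) : Prop := S ≠ []
instance (message : List Int) (S : List Int) : Decidable (Pre_dewhitening message S) := by unfold Pre_dewhitening; infer_instance
def pvWitness_dewhitening : List Int × List Int := ([1, 2, 3], [5, 6])

def Spec_dewhitening (message : List Int) (S : List Int) (out : String) : Prop := out = dewhitening_alt message S
instance (message : List Int) (S : List Int) (out : String) : Decidable (Spec_dewhitening message S out) := by unfold Spec_dewhitening; infer_instance

-- ===== CLAIM (what is proved, stated in full; the proofs are below) =====
def Claim_equal_dewhitening : Prop := ∀ (message : List Int) (S : List Int), Dom_dewhitening message S → Pre_dewhitening message S → Spec_dewhitening message S (dewhitening message S)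

-- ===== LEMMAS AND PROOFS =====

-- the int list B's string pieces come from
def pvF (S msg : List Int) : List Int :=
  (PySem.List.enumerate msg).map (fun p =>
    PySem.Int.bxor p.2 (PySem.List.pyGetD S (PySem.Int.mod p.1 (S.length : Int)) 0))

lemma mod_add_len (S : List Int) (hS : S ≠ []) (a : Int) :
    PySem.Int.mod (a + (S.length : Int)) (S.length : Int) = PySem.Int.mod a (S.length : Int) := by
  have h : (0 : Int) < (S.length : Int) := by
    exact_mod_cast List.length_pos_iff.mpr hS
  rw [PySem.Int.mod_eq_emod_of_pos h, PySem.Int.mod_eq_emod_of_pos h, Int.add_emod_right]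

lemma enum_shift (S : List Int) (hS : S ≠ []) :
    ∀ (xs : List Int) (s : Int),
      (PySem.List.enumerate xs (s + (S.length : Int))).map (fun p =>
        PySem.Int.bxor p.2 (PySem.List.pyGetD S (PySem.Int.mod p.1 (S.length : Int)) 0))
      = (PySem.List.enumerate xs s).map (fun p =>
        PySem.Int.bxor p.2 (PySem.List.pyGetD S (PySem.Int.mod p.1 (S.length : Int)) 0)) := by
  intro xs
  induction xs with
  | nil => intro s; simp [PySem.List.enumerate_nil]
  | cons x xs ih =>
    intro s
    rw [PySem.List.enumerate_cons, PySem.List.enumerate_cons]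
    simp only [List.map_cons]
    rw [mod_add_len S hS s]
    have : s + (S.length : Int) + 1 = (s + 1) + (S.length : Int) := by ring
    rw [this, ih (s + 1)]

lemma zip_eq_pvF (S msg : List Int) (hle : msg.length ≤ S.length) :
    List.zipWith PySem.Int.bxor msg S = pvF S msg := by
  apply List.ext_getElem
  · simp [pvF, PySem.List.length_enumerate]
    omega
  · intro i h1 h2
    have hi : i < msg.length := by simp at h1; omega
    have hiS : i < S.length := lt_of_lt_of_le hi hle
    rw [List.getElem_zipWith]
    simp only [pvF, List.getElem_map, PySem.List.getElem_enumerate]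
    have hmod : PySem.Int.mod ((0 : Int) + (i : Nat)) (S.length : Int) = (i : Int) := by
      have hpos : (0 : Int) < (S.length : Int) := by exact_mod_cast Nat.lt_of_le_of_lt (Nat.zero_le _) hiS
      rw [PySem.Int.mod_eq_emod_of_pos hpos]
      simp only [zero_add]
      exact Int.emod_eq_of_lt (by positivity) (by exact_mod_cast hiS)
    rw [hmod, PySem.List.pyGetD_natCast]
    rw [List.getD_eq_getElem _ _ hiS]

lemma pvF_split (S msg : List Int) (hS : S ≠ []) (hge : S.length ≤ msg.length) :
    pvF S msg = List.zipWith PySem.Int.bxor (msg.take S.length) S ++ pvF S (msg.drop S.length) := by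
  have htk : (msg.take S.length).length = S.length := by simp; omega
  conv_lhs => rw [pvF, ← List.take_append_drop S.length msg]
  rw [PySem.List.enumerate_append, List.map_append, htk]
  congr 1
  · exact (zip_eq_pvF S _ (le_of_eq htk)).symm
  · exact enum_shift S hS (msg.drop S.length) 0

lemma loop_eq (S : List Int) (hS : S ≠ []) :
    ∀ (k : Nat) (msg W : List Int), msg.length ≤ k →
      (dwLoopA S hS msg W).2 ++ List.zipWith PySem.Int.bxor (dwLoopA S hS msg W).1 S
      = W ++ pvF S msg := by
  intro k
  induction k with
  | zero =>
    intro msg W hk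
    have : msg = [] := List.eq_nil_of_length_eq_zero (Nat.le_zero.mp hk)
    subst this
    rw [dwLoopA]
    simp [pvF, PySem.List.enumerate_nil]
  | succ k ih =>
    intro msg W hk
    rw [dwLoopA]
    split
    · rename_i hlt
      have hpos : 0 < S.length := List.length_pos_iff.mpr hS
      have hdrop : (msg.drop S.length).length ≤ k := by simp; omega
      rw [ih _ _ hdrop, pvF_split S msg hS (le_of_lt hlt), List.append_assoc]
    · rename_i hnlt
      simp only
      rw [zip_eq_pvF S msg (by omega)]

-- ===== VERDICT (by name: the statement is the Claim_ definition above) =====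
theorem dewhitening_spec : Claim_equal_dewhitening := by
  intro message S _ hPre
  unfold Spec_dewhitening dewhitening dewhitening_alt
  rw [dif_neg hPre]
  have h := loop_eq S hPre message.length message [] (le_refl _)
  simp only [List.nil_append] at h
  show PySem.Str.join ""
      (((dwLoopA S hPre message []).2 ++
        List.zipWith PySem.Int.bxor (dwLoopA S hPre message []).1 S).map PySem.Int.toStr) = _
  rw [h, pvF, List.map_map]
  rfl
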